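-- pv_equiv track=rewrite | github.com/dps96744/tiktokshop | TikTok Shop_cohortanalysisai.py | factorial_bfs
-- ===== SOURCE A (Python) =====
-- from typing import Dict, Any, List, Optional
--
-- def repeated_expansion_block(number: int) -> int:
--     if number < 0:
--         raise ValueError("No factorial for negative numbers.")
--     if number <= 1:
--         return 1
--     fact = 1
--     for i in range(2, number + 1):
--         fact *= i
--     return fact
--
-- def factorial_bfs(graph: Dict[Any, List[Any]], start: Any) -> int:
--     visited = []
--     queue = [start]
--     while queue:
--         node = queue.pop(0)
--         if node not in visited:
--             visited.append(node)
--             neighbors = graph.get(node, [])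
--             for n in neighbors:
--                 if n not in visited:
--                     queue.append(n)
--     count = len(visited)
--     return repeated_expansion_block(count)
-- ===== SOURCE B (Python) =====
-- def factorial_bfs(graph, start):
--     # Level-synchronized frontier traversal over a set: expand the whole
--     # frontier into the next one, round by round, then take the factorial.
--     visited = {start}
--     frontier = [start]
--     while frontier:
--         nxt = []
--         for v in frontier:
--             for n in graph.get(v, []):
--                 if n not in visited:
--                     visited.add(n)
--                     nxt.append(n)
--         frontier = nxt
--     count = len(visited)
--     fact = 1
--     for i in range(2, count + 1):
--         fact *= i
--     return fact
-- ===== Notes on version B (the rewrite author's own statement) =====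
-- stated objective: alternative
-- what changed: Replaces the queue.pop(0) worklist with a visited list by level-synchronized frontier expansion over a set; the reachable-node count is obtained by a different traversal, and on the timing inputs the shared factorial computation dominates, so no speed is claimed.
import Mathlib
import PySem

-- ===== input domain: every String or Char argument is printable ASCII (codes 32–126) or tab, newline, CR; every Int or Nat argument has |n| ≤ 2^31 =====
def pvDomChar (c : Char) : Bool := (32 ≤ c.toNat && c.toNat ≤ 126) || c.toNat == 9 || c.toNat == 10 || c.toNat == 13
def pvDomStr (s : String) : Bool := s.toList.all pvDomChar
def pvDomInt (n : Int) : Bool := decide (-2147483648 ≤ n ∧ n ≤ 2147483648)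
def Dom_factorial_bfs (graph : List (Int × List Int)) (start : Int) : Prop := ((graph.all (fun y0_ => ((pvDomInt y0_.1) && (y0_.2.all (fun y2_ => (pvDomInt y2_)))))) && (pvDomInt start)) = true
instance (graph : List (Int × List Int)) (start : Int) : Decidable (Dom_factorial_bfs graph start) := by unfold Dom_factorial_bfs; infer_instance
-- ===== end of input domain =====

-- B replaces A's queue.pop(0)/visited-list BFS by level-synchronized frontier
-- expansion over a set (objective: alternative traversal of the same graph).

-- ===== PORT A =====
-- graph.get(node, []) (shared by both ports: both Pythons look neighbours up the same way)
def pvAdj (graph : List (Int × List Int)) (v : Int) : List Int :=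
  (PySem.Dict.mk graph).getD v []

-- fuel bound for A's while-loop (a totality guard only: the loop pops one queue
-- element per iteration, and at most 1 + Σ|adjacency| elements are ever enqueued)
def pvUniv (graph : List (Int × List Int)) (start : Int) : List Int :=
  start :: graph.flatMap (fun p => p.2)

def pvFuelA (graph : List (Int × List Int)) (start : Int) : Nat :=
  2 + ((pvUniv graph start).map (fun v => (pvAdj graph v).length)).sum

-- Python raises ValueError for number < 0; factorial_bfs only calls it with a
-- list length (≥ 0), so that branch is unreachable from the entry point.
def repeated_expansion_block (number : Int) : Int :=
  if number ≤ 1 then 1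
  else (PySem.List.pyRange 2 (number + 1) 1).foldl (fun fact i => fact * i) 1

-- while queue: node = queue.pop(0); if node not in visited: append node, enqueue unvisited neighbours
def pvBfsLoop (graph : List (Int × List Int)) : Nat → List Int → List Int → List Int
  | 0, visited, _ => visited
  | _ + 1, visited, [] => visited
  | fuel + 1, visited, node :: rest =>
    if node ∈ visited then pvBfsLoop graph fuel visited rest
    else
      let visited' := visited ++ [node]
      pvBfsLoop graph fuel visited'
        (rest ++ (pvAdj graph node).filter (fun n => decide (n ∉ visited')))

def factorial_bfs (graph : List (Int × List Int)) (start : Int) : Int :=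
  repeated_expansion_block
    ((pvBfsLoop graph (pvFuelA graph start) [] [start]).length : Int)

-- ===== PORT B =====
-- inner body: if n not in visited: visited.add(n); nxt.append(n)
def pvStep (st : PySem.Set Int × List Int) (n : Int) : PySem.Set Int × List Int :=
  if n ∈ st.1 then st else (PySem.Set.add st.1 n, st.2 ++ [n])

-- one round: for v in frontier: for n in graph.get(v, []): …
def pvRound (graph : List (Int × List Int)) (visited : PySem.Set Int)
    (frontier : List Int) : PySem.Set Int × List Int :=
  frontier.foldl (fun st v => (pvAdj graph v).foldl pvStep st) (visited, [])

-- fuel bound for B's while-loop (totality guard: every round with a nonempty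
-- next frontier adds at least one new node, so at most |pvUniv| + 1 rounds run)
def pvFuelB (graph : List (Int × List Int)) (start : Int) : Nat :=
  (pvUniv graph start).length + 1

-- while frontier: …; frontier = nxt
def pvBLoop (graph : List (Int × List Int)) : Nat → PySem.Set Int → List Int → PySem.Set Int
  | 0, visited, _ => visited
  | _ + 1, visited, [] => visited
  | fuel + 1, visited, f :: fs =>
    let r := pvRound graph visited (f :: fs)
    pvBLoop graph fuel r.1 r.2

def factorial_bfs_alt (graph : List (Int × List Int)) (start : Int) : Int :=
  let visited := pvBLoop graph (pvFuelB graph start) (PySem.Set.add PySem.Set.empty start) [start]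
  let count : Int := PySem.Set.len visited
  (PySem.List.pyRange 2 (count + 1) 1).foldl (fun fact i => fact * i) 1

-- ===== PRECONDITION & SPEC =====
def Spec_factorial_bfs (graph : List (Int × List Int)) (start : Int) (out : Int) : Prop := out = factorial_bfs_alt graph start
instance (graph : List (Int × List Int)) (start : Int) (out : Int) : Decidable (Spec_factorial_bfs graph start out) := by unfold Spec_factorial_bfs; infer_instance

-- ===== CLAIM (what is proved, stated in full; the proofs are below) =====
def Claim_equal_factorial_bfs : Prop := ∀ (graph : List (Int × List Int)) (start : Int), Dom_factorial_bfs graph start → Spec_factorial_bfs graph start (factorial_bfs graph start)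

-- ===== LEMMAS AND PROOFS =====

-- reachability in graph (the common characterisation of both visited collections)
def pvReach (graph : List (Int × List Int)) (start v : Int) : Prop :=
  Relation.ReflTransGen (fun a b => b ∈ pvAdj graph a) start v

-- potential of A's loop state: every iteration strictly decreases it
def pvPhi (graph : List (Int × List Int)) (start : Int) (vis q : List Int) : Nat :=
  q.length + (((pvUniv graph start).filter (fun v => decide (v ∉ vis))).map
    (fun v => (pvAdj graph v).length)).sum

-- potential of B's loop state
def pvPsi (graph : List (Int × List Int)) (start : Int) (vis : List Int) : Nat :=
  ((pvUniv graph start).filter (fun v => decide (v ∉ vis))).length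

lemma pv_sum_filter_ne (l : List Int) (f : Int → Nat) (a : Int) (ha : a ∈ l) :
    ((l.filter (fun v => decide (v ≠ a))).map f).sum + f a ≤ (l.map f).sum := by
  induction l with
  | nil => simp at ha
  | cons b t ih =>
    simp only [List.filter_cons, List.map_cons, List.sum_cons]
    by_cases hba : b = a
    · subst hba
      rw [if_neg (by simp)]
      have hs : ((t.filter (fun v => decide (v ≠ b))).map f).Sublist (t.map f) :=
        List.filter_sublist.map f
      have := List.Sublist.sum_le_sum hs (by intro x _; exact Nat.zero_le x)
      omega
    · have hat : a ∈ t := by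
        rcases List.mem_cons.1 ha with h | h
        · exact absurd h.symm hba
        · exact h
      rw [if_pos (by simpa using hba)]
      simp only [List.map_cons, List.sum_cons]
      have := ih hat
      omega

lemma pv_length_filter_lt (l : List Int) (p q : Int → Bool)
    (hpq : ∀ x, q x = true → p x = true) (a : Int) (hal : a ∈ l)
    (hap : p a = true) (haq : q a = false) :
    (l.filter q).length < (l.filter p).length := by
  have hle : ∀ t : List Int, (t.filter q).length ≤ (t.filter p).length := by
    intro t
    simp only [← List.countP_eq_length_filter]
    exact List.countP_mono_left (fun x _ hx => hpq x hx)
  induction l with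
  | nil => simp at hal
  | cons b t ih =>
    simp only [List.filter_cons]
    rcases List.mem_cons.1 hal with rfl | hbt
    · rw [if_pos hap, if_neg (by simp [haq])]
      have := hle t
      simp only [List.length_cons]
      omega
    · by_cases hqb : q b = true
      · rw [if_pos hqb, if_pos (hpq b hqb)]
        simpa using ih hbt
      · rw [if_neg hqb]
        by_cases hpb : p b = true
        · rw [if_pos hpb]
          have := ih hbt
          simp only [List.length_cons]
          omega
        · rw [if_neg hpb]; exact ih hbt

lemma pv_adj_sub_univ (G : List (Int × List Int)) (s v x : Int)
    (hx : x ∈ pvAdj G v) : x ∈ pvUniv G s := by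
  unfold pvAdj pvUniv at *
  rw [PySem.Dict.getD_eq_get?_getD] at hx
  simp only [PySem.Dict.get?] at hx
  cases h : List.find? (fun p => p.1 == v) (PySem.Dict.mk G).items with
  | none => rw [h] at hx; simp at hx
  | some p =>
    rw [h] at hx
    simp only [Option.map_some, Option.getD_some] at hx
    have hp : p ∈ (PySem.Dict.mk G).items := List.mem_of_find?_eq_some h
    have : p ∈ G := hp
    exact List.mem_cons.2 (Or.inr (List.mem_flatMap.2 ⟨p, this, hx⟩))


lemma pv_phi_step (G : List (Int × List Int)) (s node : Int) (vis rest news : List Int)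
    (hu : node ∈ pvUniv G s) (hv : node ∉ vis)
    (hn : news.length ≤ (pvAdj G node).length) :
    pvPhi G s (vis ++ [node]) (rest ++ news) + 1 ≤ pvPhi G s vis (node :: rest) := by
  unfold pvPhi
  have hfe : (pvUniv G s).filter (fun v => decide (v ∉ vis ++ [node]))
      = ((pvUniv G s).filter (fun v => decide (v ∉ vis))).filter (fun v => decide (v ≠ node)) := by
    rw [List.filter_filter]
    apply List.filter_congr
    intro x _
    simp [List.mem_append, not_or, and_comm]
  rw [hfe]
  have hmem : node ∈ (pvUniv G s).filter (fun v => decide (v ∉ vis)) := by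
    simp [List.mem_filter, hu, hv]
  have := pv_sum_filter_ne ((pvUniv G s).filter (fun v => decide (v ∉ vis)))
    (fun v => (pvAdj G v).length) node hmem
  have he : ((fun v => (pvAdj G v).length) node) = (pvAdj G node).length := rfl
  rw [he] at this
  simp only [List.length_append, List.length_cons]
  omega




lemma bfsA_mono (G : List (Int × List Int)) (fuel : Nat) :
    ∀ vis q x, x ∈ vis → x ∈ pvBfsLoop G fuel vis q := by
  induction fuel with
  | zero => intro vis q x hx; exact hx
  | succ fuel ih =>
    intro vis q x hx
    cases q with
    | nil => exact hx
    | cons node rest =>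
      simp only [pvBfsLoop]
      split
      · exact ih vis rest x hx
      · exact ih _ _ x (List.mem_append.2 (Or.inl hx))

lemma bfsA_nodup (G : List (Int × List Int)) (fuel : Nat) :
    ∀ vis q, vis.Nodup → (pvBfsLoop G fuel vis q).Nodup := by
  induction fuel with
  | zero => intro vis q h; exact h
  | succ fuel ih =>
    intro vis q h
    cases q with
    | nil => exact h
    | cons node rest =>
      simp only [pvBfsLoop]
      split
      · exact ih vis rest h
      · next hnode =>
        exact ih _ _ (by refine List.Nodup.append h (List.nodup_singleton _) ?_; intro a ha hb; exact hnode ((List.mem_singleton.1 hb) ▸ ha))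

lemma pvPhi_cons (G : List (Int × List Int)) (s node : Int) (vis rest : List Int) :
    pvPhi G s vis (node :: rest) = pvPhi G s vis rest + 1 := by
  unfold pvPhi; simp only [List.length_cons]; omega

lemma bfsA_queue (G : List (Int × List Int)) (s : Int) (fuel : Nat) :
    ∀ vis q, (∀ x ∈ q, x ∈ pvUniv G s) → pvPhi G s vis q ≤ fuel →
      ∀ x ∈ q, x ∈ pvBfsLoop G fuel vis q := by
  induction fuel with
  | zero =>
    intro vis q hq hf x hx
    exfalso
    unfold pvPhi at hf
    have : q.length = 0 := by omega
    simp [List.length_eq_zero_iff.1 this] at hx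
  | succ fuel ih =>
    intro vis q hq hf x hx
    cases q with
    | nil => simp at hx
    | cons node rest =>
      simp only [pvBfsLoop]
      split
      · next hnode =>
        rcases List.mem_cons.1 hx with rfl | hxr
        · exact bfsA_mono G fuel vis rest x hnode
        · refine ih vis rest (fun y hy => hq y (List.mem_cons_of_mem _ hy)) ?_ x hxr
          rw [pvPhi_cons] at hf; omega
      · next hnode =>
        have hstep := pv_phi_step G s node vis rest
          ((pvAdj G node).filter (fun n => decide (n ∉ vis ++ [node])))
          (hq node List.mem_cons_self) hnode (List.length_filter_le _ _)
        rcases List.mem_cons.1 hx with rfl | hxr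
        · exact bfsA_mono G fuel _ _ x (List.mem_append.2 (Or.inr (List.mem_singleton.2 rfl)))
        · refine ih _ _ ?_ (by omega) x (List.mem_append.2 (Or.inl hxr))
          intro y hy
          rcases List.mem_append.1 hy with h | h
          · exact hq y (List.mem_cons_of_mem _ h)
          · exact pv_adj_sub_univ G s node y (List.mem_filter.1 h).1

lemma bfsA_closed (G : List (Int × List Int)) (s : Int) (fuel : Nat) :
    ∀ vis q, (∀ x ∈ q, x ∈ pvUniv G s) → pvPhi G s vis q ≤ fuel →
      (∀ v ∈ vis, ∀ n ∈ pvAdj G v, n ∈ vis ∨ n ∈ q) →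
      ∀ v ∈ pvBfsLoop G fuel vis q, ∀ n ∈ pvAdj G v, n ∈ pvBfsLoop G fuel vis q := by
  induction fuel with
  | zero =>
    intro vis q hq hf inv v hv n hn
    unfold pvPhi at hf
    have hq0 : q = [] := List.length_eq_zero_iff.1 (by omega)
    subst hq0
    rcases inv v hv n hn with h | h
    · exact h
    · simp at h
  | succ fuel ih =>
    intro vis q hq hf inv
    cases q with
    | nil =>
      intro v hv n hn
      rcases inv v hv n hn with h | h
      · exact h
      · simp at h
    | cons node rest =>
      simp only [pvBfsLoop]
      split
      · next hnode =>
        refine ih vis rest (fun y hy => hq y (List.mem_cons_of_mem _ hy))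
          (by rw [pvPhi_cons] at hf; omega) ?_
        intro v hv n hn
        rcases inv v hv n hn with h | h
        · exact Or.inl h
        · rcases List.mem_cons.1 h with rfl | h
          · exact Or.inl hnode
          · exact Or.inr h
      · next hnode =>
        have hstep := pv_phi_step G s node vis rest
          ((pvAdj G node).filter (fun n => decide (n ∉ vis ++ [node])))
          (hq node List.mem_cons_self) hnode (List.length_filter_le _ _)
        refine ih _ _ ?_ (by omega) ?_
        · intro y hy
          rcases List.mem_append.1 hy with h | h
          · exact hq y (List.mem_cons_of_mem _ h)
          · exact pv_adj_sub_univ G s node y (List.mem_filter.1 h).1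
        · intro v hv n hn
          rcases List.mem_append.1 hv with hvv | hvn
          · rcases inv v hvv n hn with h | h
            · exact Or.inl (List.mem_append.2 (Or.inl h))
            · rcases List.mem_cons.1 h with rfl | h
              · exact Or.inl (List.mem_append.2 (Or.inr (List.mem_singleton.2 rfl)))
              · exact Or.inr (List.mem_append.2 (Or.inl h))
          · have hvnode : v = node := List.mem_singleton.1 hvn
            subst hvnode
            by_cases hmem : n ∈ vis ++ [v]
            · exact Or.inl hmem
            · exact Or.inr (List.mem_append.2 (Or.inr (List.mem_filter.2 ⟨hn, by simpa using hmem⟩)))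

lemma bfsA_sound (G : List (Int × List Int)) (s : Int) (fuel : Nat) :
    ∀ vis q, (∀ x ∈ vis, pvReach G s x) → (∀ x ∈ q, pvReach G s x) →
      ∀ x ∈ pvBfsLoop G fuel vis q, pvReach G s x := by
  induction fuel with
  | zero => intro vis q hv _ x hx; exact hv x hx
  | succ fuel ih =>
    intro vis q hv hq x hx
    cases q with
    | nil => exact hv x hx
    | cons node rest =>
      simp only [pvBfsLoop] at hx
      split at hx
      · exact ih vis rest hv (fun y hy => hq y (List.mem_cons_of_mem _ hy)) x hx
      · refine ih _ _ ?_ ?_ x hx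
        · intro y hy
          rcases List.mem_append.1 hy with h | h
          · exact hv y h
          · rw [List.mem_singleton.1 h]; exact hq node List.mem_cons_self
        · intro y hy
          rcases List.mem_append.1 hy with h | h
          · exact hq y (List.mem_cons_of_mem _ h)
          · exact Relation.ReflTransGen.tail (hq node List.mem_cons_self) (List.mem_filter.1 h).1

lemma memA_iff (G : List (Int × List Int)) (s x : Int) :
    x ∈ pvBfsLoop G (pvFuelA G s) [] [s] ↔ pvReach G s x := by
  have hq : ∀ y ∈ ([s] : List Int), y ∈ pvUniv G s := by
    intro y hy; rw [List.mem_singleton.1 hy]; exact List.mem_cons_self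
  have hf : pvPhi G s [] [s] ≤ pvFuelA G s := by
    unfold pvPhi pvFuelA
    simp only [List.length_singleton]
    have : (pvUniv G s).filter (fun v => decide (v ∉ ([] : List Int))) = pvUniv G s := by
      simp
    rw [this]; omega
  constructor
  · exact fun hx => bfsA_sound G s _ [] [s] (by simp) (fun y hy => by
      rw [List.mem_singleton.1 hy]; exact Relation.ReflTransGen.refl) x hx
  · intro hr
    induction hr with
    | refl => exact bfsA_queue G s _ [] [s] hq hf s List.mem_cons_self
    | tail _ hbc ihm => exact bfsA_closed G s _ [] [s] hq hf (by simp) _ ihm _ hbc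

lemma pv_stepFold_mem1 :
    ∀ (l : List Int) (st : PySem.Set Int × List Int) (x : Int),
      x ∈ (l.foldl pvStep st).1 ↔ x ∈ st.1 ∨ x ∈ l := by
  intro l
  induction l with
  | nil => intro st x; simp
  | cons n t ih =>
    intro st x
    simp only [List.foldl_cons]
    rw [ih]
    unfold pvStep
    split
    · next h =>
      simp only [List.mem_cons]
      constructor
      · rintro (h1 | h2)
        · exact Or.inl h1
        · exact Or.inr (Or.inr h2)
      · rintro (h1 | rfl | h2)
        · exact Or.inl h1
        · exact Or.inl h
        · exact Or.inr h2
    · next h =>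
      simp only [PySem.Set.mem_add, List.mem_cons]
      constructor
      · rintro ((h1 | rfl) | h2)
        · exact Or.inl h1
        · exact Or.inr (Or.inl rfl)
        · exact Or.inr (Or.inr h2)
      · rintro (h1 | rfl | h2)
        · exact Or.inl (Or.inl h1)
        · exact Or.inl (Or.inr rfl)
        · exact Or.inr h2

lemma pv_stepFold_mem2 (vis0 : List Int) :
    ∀ (l : List Int) (st : PySem.Set Int × List Int),
      (∀ y, y ∈ st.1 ↔ y ∈ vis0 ∨ y ∈ st.2) →
      ∀ y, y ∈ (l.foldl pvStep st).1 ↔ y ∈ vis0 ∨ y ∈ (l.foldl pvStep st).2 := by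
  intro l
  induction l with
  | nil => intro st h y; exact h y
  | cons n t ih =>
    intro st h y
    simp only [List.foldl_cons]
    refine ih _ ?_ y
    unfold pvStep
    split
    · exact h
    · next hn =>
      intro z
      simp only [PySem.Set.mem_add, List.mem_append, List.mem_singleton, h z]
      tauto

lemma pv_stepFold_disj (vis0 : List Int) :
    ∀ (l : List Int) (st : PySem.Set Int × List Int),
      (∀ y ∈ st.2, y ∉ vis0) → (∀ y ∈ vis0, y ∈ st.1) →
      (∀ y ∈ (l.foldl pvStep st).2, y ∉ vis0) ∧ (∀ y ∈ vis0, y ∈ (l.foldl pvStep st).1) := by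
  intro l
  induction l with
  | nil => intro st h1 h2; exact ⟨h1, h2⟩
  | cons n t ih =>
    intro st h1 h2
    simp only [List.foldl_cons]
    refine ih _ ?_ ?_
    · unfold pvStep
      split
      · exact h1
      · next hn =>
        intro y hy
        rcases List.mem_append.1 hy with h | h
        · exact h1 y h
        · rw [List.mem_singleton.1 h]
          intro hc; exact hn (h2 n hc)
    · unfold pvStep
      split
      · exact h2
      · intro y hy
        exact (PySem.Set.mem_add _ _ _).2 (Or.inl (h2 y hy))

lemma pv_stepFold_nodup :
    ∀ (l : List Int) (st : PySem.Set Int × List Int),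
      st.1.Nodup → (l.foldl pvStep st).1.Nodup := by
  intro l
  induction l with
  | nil => intro st h; exact h
  | cons n t ih =>
    intro st h
    simp only [List.foldl_cons]
    refine ih _ ?_
    unfold pvStep
    split
    · exact h
    · simp only [PySem.Set.add, PySem.Set.contains]
      split
      · exact h
      · next hc =>
        refine List.Nodup.append h (List.nodup_singleton _) ?_
        intro a ha hb
        rw [List.mem_singleton.1 hb] at ha
        simp [List.contains_eq_mem] at hc
        exact hc ha

lemma roundMem1 (G : List (Int × List Int)) (vis : PySem.Set Int) (f : List Int) (y : Int) :
    y ∈ (pvRound G vis f).1 ↔ y ∈ vis ∨ ∃ v ∈ f, y ∈ pvAdj G v := by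
  unfold pvRound
  have : ∀ (f : List Int) (st : PySem.Set Int × List Int),
      y ∈ (f.foldl (fun st v => (pvAdj G v).foldl pvStep st) st).1
        ↔ y ∈ st.1 ∨ ∃ v ∈ f, y ∈ pvAdj G v := by
    intro f
    induction f with
    | nil => intro st; simp
    | cons v t ih =>
      intro st
      simp only [List.foldl_cons]
      rw [ih, pv_stepFold_mem1]
      simp only [List.mem_cons]
      constructor
      · rintro ((h | h) | ⟨w, hw, hy⟩)
        · exact Or.inl h
        · exact Or.inr ⟨v, Or.inl rfl, h⟩
        · exact Or.inr ⟨w, Or.inr hw, hy⟩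
      · rintro (h | ⟨w, (rfl | hw), hy⟩)
        · exact Or.inl (Or.inl h)
        · exact Or.inl (Or.inr hy)
        · exact Or.inr ⟨w, hw, hy⟩
  exact this f (vis, [])

lemma roundMem2 (G : List (Int × List Int)) (vis : PySem.Set Int) (f : List Int) (y : Int) :
    y ∈ (pvRound G vis f).1 ↔ y ∈ vis ∨ y ∈ (pvRound G vis f).2 := by
  unfold pvRound
  have : ∀ (f : List Int) (st : PySem.Set Int × List Int),
      (∀ z, z ∈ st.1 ↔ z ∈ vis ∨ z ∈ st.2) →
      ∀ z, z ∈ (f.foldl (fun st v => (pvAdj G v).foldl pvStep st) st).1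
        ↔ z ∈ vis ∨ z ∈ (f.foldl (fun st v => (pvAdj G v).foldl pvStep st) st).2 := by
    intro f
    induction f with
    | nil => intro st h z; exact h z
    | cons v t ih =>
      intro st h z
      simp only [List.foldl_cons]
      exact ih _ (pv_stepFold_mem2 vis _ _ h) z
  exact this f (vis, []) (by simp) y

lemma roundMem3 (G : List (Int × List Int)) (vis : PySem.Set Int) (f : List Int) (y : Int)
    (hy : y ∈ (pvRound G vis f).2) : y ∉ vis := by
  unfold pvRound at hy
  have : ∀ (f : List Int) (st : PySem.Set Int × List Int),
      (∀ z ∈ st.2, z ∉ vis) → (∀ z ∈ vis, z ∈ st.1) →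
      (∀ z ∈ (f.foldl (fun st v => (pvAdj G v).foldl pvStep st) st).2, z ∉ vis) := by
    intro f
    induction f with
    | nil => intro st h1 _; exact h1
    | cons v t ih =>
      intro st h1 h2
      simp only [List.foldl_cons]
      have := pv_stepFold_disj vis (pvAdj G v) st h1 h2
      exact ih _ this.1 this.2
  exact this f (vis, []) (by simp) (fun z hz => hz) y hy

lemma roundNodup (G : List (Int × List Int)) (vis : PySem.Set Int) (f : List Int)
    (h : vis.Nodup) : (pvRound G vis f).1.Nodup := by
  unfold pvRound
  have : ∀ (f : List Int) (st : PySem.Set Int × List Int),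
      st.1.Nodup → (f.foldl (fun st v => (pvAdj G v).foldl pvStep st) st).1.Nodup := by
    intro f
    induction f with
    | nil => intro st h; exact h
    | cons v t ih =>
      intro st h
      simp only [List.foldl_cons]
      exact ih _ (pv_stepFold_nodup _ _ h)
  exact this f (vis, []) h

lemma bB_nil (G : List (Int × List Int)) (fuel : Nat) (vis : PySem.Set Int) :
    pvBLoop G fuel vis [] = vis := by
  cases fuel <;> rfl

lemma bB_mono (G : List (Int × List Int)) (fuel : Nat) :
    ∀ vis f x, x ∈ vis → x ∈ pvBLoop G fuel vis f := by
  induction fuel with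
  | zero => intro vis f x hx; exact hx
  | succ fuel ih =>
    intro vis f x hx
    cases f with
    | nil => exact hx
    | cons a t =>
      simp only [pvBLoop]
      exact ih _ _ x ((roundMem1 G vis (a :: t) x).2 (Or.inl hx))

lemma bB_nodup (G : List (Int × List Int)) (fuel : Nat) :
    ∀ vis f, vis.Nodup → (pvBLoop G fuel vis f).Nodup := by
  induction fuel with
  | zero => intro vis f h; exact h
  | succ fuel ih =>
    intro vis f h
    cases f with
    | nil => exact h
    | cons a t =>
      simp only [pvBLoop]
      exact ih _ _ (roundNodup G vis (a :: t) h)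

lemma bB_sound (G : List (Int × List Int)) (s : Int) (fuel : Nat) :
    ∀ vis f, (∀ x ∈ vis, pvReach G s x) → (∀ v ∈ f, v ∈ vis) →
      ∀ x ∈ pvBLoop G fuel vis f, pvReach G s x := by
  induction fuel with
  | zero => intro vis f hv _ x hx; exact hv x hx
  | succ fuel ih =>
    intro vis f hv hf x hx
    cases f with
    | nil => exact hv x hx
    | cons a t =>
      simp only [pvBLoop] at hx
      refine ih _ _ ?_ ?_ x hx
      · intro y hy
        rcases (roundMem1 G vis (a :: t) y).1 hy with h | ⟨v, hvf, hyv⟩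
        · exact hv y h
        · exact Relation.ReflTransGen.tail (hv v (hf v hvf)) hyv
      · intro v hvf
        exact (roundMem2 G vis (a :: t) v).2 (Or.inr hvf)

lemma bB_closed (G : List (Int × List Int)) (s : Int) (fuel : Nat) :
    ∀ vis f, (∀ v ∈ f, v ∈ pvUniv G s) → pvPsi G s vis < fuel →
      (∀ v ∈ vis, (∀ n ∈ pvAdj G v, n ∈ vis) ∨ v ∈ f) →
      ∀ v ∈ pvBLoop G fuel vis f, ∀ n ∈ pvAdj G v, n ∈ pvBLoop G fuel vis f := by
  induction fuel with
  | zero => intro vis f _ hf _; omega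
  | succ fuel ih =>
    intro vis f hfu hf inv
    cases f with
    | nil =>
      intro v hv n hn
      rcases inv v hv with h | h
      · exact h n hn
      · simp at h
    | cons a t =>
      simp only [pvBLoop]
      set r := pvRound G vis (a :: t) with hr
      cases hr2 : r.2 with
      | nil =>
        rw [bB_nil]
        intro v hv n hn
        have hvvis : v ∈ vis := by
          rcases (roundMem2 G vis (a :: t) v).1 hv with h | h
          · exact h
          · rw [hr2] at h; simp at h
        rcases inv v hvvis with h | h
        · exact (roundMem1 G vis (a :: t) n).2 (Or.inl (h n hn))
        · exact (roundMem1 G vis (a :: t) n).2 (Or.inr ⟨v, h, hn⟩)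
      | cons b u =>
        rw [← hr2]
        refine ih r.1 r.2 ?_ ?_ ?_
        · intro v hvf
          have hv1 : v ∈ r.1 := (roundMem2 G vis (a :: t) v).2 (Or.inr hvf)
          rcases (roundMem1 G vis (a :: t) v).1 hv1 with h | ⟨w, _, hvw⟩
          · exact absurd h (roundMem3 G vis (a :: t) v hvf)
          · exact pv_adj_sub_univ G s w v hvw
        · -- pvPsi r.1 < fuel
          have hb2 : b ∈ r.2 := by rw [hr2]; exact List.mem_cons_self
          have hb1 : b ∈ r.1 := (roundMem2 G vis (a :: t) b).2 (Or.inr hb2)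
          have hbnv : b ∉ vis := roundMem3 G vis (a :: t) b hb2
          have hbu : b ∈ pvUniv G s := by
            rcases (roundMem1 G vis (a :: t) b).1 hb1 with h | ⟨w, _, hbw⟩
            · exact absurd h hbnv
            · exact pv_adj_sub_univ G s w b hbw
          have hlt : pvPsi G s r.1 < pvPsi G s vis := by
            unfold pvPsi
            refine pv_length_filter_lt (pvUniv G s) _ _ ?_ b hbu (by simpa using hbnv)
              (by simpa using hb1)
            intro x hx
            simp only [decide_eq_true_eq] at hx ⊢
            intro hc
            exact hx ((roundMem2 G vis (a :: t) x).2 (Or.inl hc))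
          omega
        · intro v hv
          rcases (roundMem2 G vis (a :: t) v).1 hv with hvvis | hvr2
          · rcases inv v hvvis with h | h
            · exact Or.inl (fun n hn => (roundMem1 G vis (a :: t) n).2 (Or.inl (h n hn)))
            · exact Or.inl (fun n hn => (roundMem1 G vis (a :: t) n).2 (Or.inr ⟨v, h, hn⟩))
          · exact Or.inr hvr2

lemma memB_iff (G : List (Int × List Int)) (s x : Int) :
    x ∈ pvBLoop G (pvFuelB G s) (PySem.Set.add PySem.Set.empty s) [s] ↔ pvReach G s x := by
  have hinit : ∀ y, y ∈ PySem.Set.add PySem.Set.empty s ↔ y = s := by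
    intro y
    rw [PySem.Set.mem_add]
    simp [PySem.Set.empty]
  have hpsi : pvPsi G s (PySem.Set.add PySem.Set.empty s) < pvFuelB G s := by
    unfold pvPsi pvFuelB
    have := List.length_filter_le (fun v => decide (v ∉ PySem.Set.add PySem.Set.empty s)) (pvUniv G s)
    omega
  constructor
  · intro hx
    refine bB_sound G s _ _ [s] ?_ ?_ x hx
    · intro y hy
      rw [hinit y] at hy
      rw [hy]
      exact Relation.ReflTransGen.refl
    · intro v hv
      rw [hinit v, List.mem_singleton.1 hv]
  · intro hr
    induction hr with
    | refl => exact bB_mono G _ _ [s] s ((hinit s).2 rfl)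
    | tail _ hbc ihm =>
      refine bB_closed G s _ _ [s] ?_ hpsi ?_ _ ihm _ hbc
      · intro v hv
        rw [List.mem_singleton.1 hv]
        exact List.mem_cons_self
      · intro v hv
        exact Or.inr (by rw [(hinit v).1 hv]; exact List.mem_cons_self)



lemma pv_count_eq (G : List (Int × List Int)) (s : Int) :
    (pvBfsLoop G (pvFuelA G s) [] [s]).length
      = (pvBLoop G (pvFuelB G s) (PySem.Set.add PySem.Set.empty s) [s]).length := by
  have hA : (pvBfsLoop G (pvFuelA G s) [] [s]).Nodup :=
    bfsA_nodup G (pvFuelA G s) [] [s] List.nodup_nil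
  have hinit : (PySem.Set.add PySem.Set.empty s : List Int) = [s] := by
    simp [PySem.Set.add, PySem.Set.contains, PySem.Set.empty]
  have hB : (pvBLoop G (pvFuelB G s) (PySem.Set.add PySem.Set.empty s) [s]).Nodup :=
    bB_nodup G (pvFuelB G s) _ [s] (by rw [hinit]; exact List.nodup_singleton s)
  have hmem : ∀ x, x ∈ pvBfsLoop G (pvFuelA G s) [] [s]
      ↔ x ∈ pvBLoop G (pvFuelB G s) (PySem.Set.add PySem.Set.empty s) [s] :=
    fun x => (memA_iff G s x).trans (memB_iff G s x).symm
  have hfin : (pvBfsLoop G (pvFuelA G s) [] [s]).toFinset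
      = (pvBLoop G (pvFuelB G s) (PySem.Set.add PySem.Set.empty s) [s]).toFinset := by
    apply Finset.ext
    intro a
    simp only [List.mem_toFinset]
    exact hmem a
  calc (pvBfsLoop G (pvFuelA G s) [] [s]).length
      = (pvBfsLoop G (pvFuelA G s) [] [s]).toFinset.card :=
        (List.toFinset_card_of_nodup hA).symm
    _ = (pvBLoop G (pvFuelB G s) (PySem.Set.add PySem.Set.empty s) [s]).toFinset.card := by
        rw [hfin]
    _ = (pvBLoop G (pvFuelB G s) (PySem.Set.add PySem.Set.empty s) [s]).length :=
        List.toFinset_card_of_nodup hB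

lemma pv_fact_eq (n : Nat) :
    repeated_expansion_block (n : Int)
      = (PySem.List.pyRange 2 ((n : Int) + 1) 1).foldl (fun fact i => fact * i) 1 := by
  unfold repeated_expansion_block
  by_cases h : (n : Int) ≤ 1
  · rw [if_pos h]
    have h01 : n = 0 ∨ n = 1 := by omega
    rcases h01 with rfl | rfl <;> decide
  · rw [if_neg h]


-- ===== VERDICT (by name: the statement is the Claim_ definition above) =====
theorem factorial_bfs_spec : Claim_equal_factorial_bfs := by
  intro G s _
  show factorial_bfs G s = factorial_bfs_alt G s
  unfold factorial_bfs factorial_bfs_alt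
  simp only [PySem.Set.len]
  rw [← pv_count_eq G s]
  exact pv_fact_eq (pvBfsLoop G (pvFuelA G s) [] [s]).length
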